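-- pv_equiv track=rewrite | github.com/aryannair876/findlead-intelligence-platform | tools/email_integration_tools.py | _clean_email_content
-- ===== SOURCE A (Python) =====
-- def _clean_email_content(body: str) -> str:
--     """Clean email content for analysis"""
--     # Remove email signatures
--     lines = body.split('\n')
--     cleaned_lines = []
--
--     signature_indicators = ['--', 'sent from', 'best regards', 'sincerely', 'thank you']
--
--     for line in lines:
--         line_lower = line.lower().strip()
--         # Stop at common signature indicators
--         if any(indicator in line_lower for indicator in signature_indicators) and len(line.strip()) < 50:
--             break
--         cleaned_lines.append(line)
--
--     cleaned_body = '\n'.join(cleaned_lines)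
--
--     # Remove quoted text (replies)
--     if '>' in cleaned_body:
--         lines = cleaned_body.split('\n')
--         non_quoted = [line for line in lines if not line.strip().startswith('>')]
--         cleaned_body = '\n'.join(non_quoted)
--
--     return cleaned_body.strip()
-- ===== SOURCE B (Python) =====
-- def _clean_email_content(body: str) -> str:
--     """Clean email content for analysis"""
--     signature_indicators = ['--', 'sent from', 'best regards', 'sincerely', 'thank you']
--     kept = []
--     for line in body.split('\n'):
--         line_lower = line.lower().strip()
--         if any(ind in line_lower for ind in signature_indicators) and len(line.strip()) < 50:
--             break
--         if not line.strip().startswith('>'):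
--             kept.append(line)
--     return '\n'.join(kept).strip()
-- ===== Notes on version B (the rewrite author's own statement) =====
-- stated objective: simpler
-- what changed: Single pass over the split lines that breaks at a signature indicator and skips quoted lines in the same loop, instead of A's two sequential passes with a join, a quote-marker membership re-test, a re-split and a re-join (that guard is a no-op, so fusing the filter preserves the output).
import Mathlib
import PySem

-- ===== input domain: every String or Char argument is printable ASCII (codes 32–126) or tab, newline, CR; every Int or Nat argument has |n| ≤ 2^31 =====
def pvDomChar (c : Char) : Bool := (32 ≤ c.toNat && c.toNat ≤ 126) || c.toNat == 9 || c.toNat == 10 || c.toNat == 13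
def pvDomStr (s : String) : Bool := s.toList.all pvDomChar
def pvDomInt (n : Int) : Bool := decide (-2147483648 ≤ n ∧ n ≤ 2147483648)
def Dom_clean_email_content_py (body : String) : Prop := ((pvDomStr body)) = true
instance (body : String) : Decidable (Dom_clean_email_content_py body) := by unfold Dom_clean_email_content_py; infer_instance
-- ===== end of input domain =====

-- B fuses A's two passes (signature cut-off, then join / quote-marker test / re-split / quoted-line
-- filter / re-join) into one loop over the split lines; objective: simpler. Same output on every input.

-- ===== PORT A =====
def pvSigIndicators : List String := ["--", "sent from", "best regards", "sincerely", "thank you"]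

-- the break condition shared verbatim by both Pythons:
-- any(ind in line.lower().strip() for ind in signature_indicators) and len(line.strip()) < 50
def pvSigBreak (line : String) : Bool :=
  (pvSigIndicators.any (fun ind => PySem.Str.isIn ind (PySem.Str.strip (PySem.Str.lower line)))) &&
  decide (PySem.Str.len (PySem.Str.strip line) < 50)

-- A's first pass: append lines until the signature condition breaks the loop
def pvALoop (lines : List String) : List String :=
  match lines with
  | [] => []
  | l :: rest => if pvSigBreak l then [] else l :: pvALoop rest

def clean_email_content_py (body : String) : String :=
  let lines := (PySem.Str.split? body "\n").getD []   -- sep "\n" ≠ "": split? is always some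
  let cleaned_lines := pvALoop lines
  let cleaned_body := PySem.Str.join "\n" cleaned_lines
  let cleaned_body :=
    if PySem.Str.isIn ">" cleaned_body then
      PySem.Str.join "\n" (((PySem.Str.split? cleaned_body "\n").getD []).filter
        (fun line => !(PySem.Str.startswith (PySem.Str.strip line) ">")))
    else cleaned_body
  PySem.Str.strip cleaned_body

-- ===== PORT B =====
-- B's single pass: break on the signature condition, skip quoted lines, keep the rest
def pvBLoop (lines : List String) : List String :=
  match lines with
  | [] => []
  | l :: rest =>
    if pvSigBreak l then []
    else if PySem.Str.startswith (PySem.Str.strip l) ">" then pvBLoop rest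
    else l :: pvBLoop rest

def clean_email_content_py_alt (body : String) : String :=
  PySem.Str.strip (PySem.Str.join "\n" (pvBLoop ((PySem.Str.split? body "\n").getD [])))

-- ===== PRECONDITION & SPEC =====
def Spec_clean_email_content_py (body : String) (out : String) : Prop := out = clean_email_content_py_alt body
instance (body : String) (out : String) : Decidable (Spec_clean_email_content_py body out) := by unfold Spec_clean_email_content_py; infer_instance

-- ===== CLAIM (what is proved, stated in full; the proofs are below) =====
def Claim_equal_clean_email_content_py : Prop := ∀ (body : String), Dom_clean_email_content_py body → Spec_clean_email_content_py body (clean_email_content_py body)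

-- ===== LEMMAS AND PROOFS =====

-- every piece of List.splitOn c s is c-free
theorem pv_mem_splitOn_not_mem (c : Char) (s : List Char) : ∀ p ∈ List.splitOn c s, c ∉ p := by
  induction s with
  | nil => intro p hp; simp [List.splitOn, List.splitOnP_nil] at hp; simp [hp]
  | cons a t ih =>
    intro p hp
    simp only [List.splitOn, List.splitOnP_cons] at hp ih
    by_cases h : a = c
    · simp [h] at hp
      rcases hp with h1 | h1
      · simp [h1]
      · exact ih p h1
    · simp [h] at hp
      cases ht : List.splitOnP (· == c) t with
      | nil => exact absurd ht (List.splitOnP_ne_nil _ _)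
      | cons q qs =>
        rw [ht] at hp
        simp [List.modifyHead] at hp
        rcases hp with h1 | h1
        · subst h1; intro hmem
          rcases List.mem_cons.mp hmem with h2 | h2
          · exact h (h2.symm)
          · exact ih q (by rw [ht]; exact List.mem_cons_self) h2
        · exact ih p (by rw [ht]; exact List.mem_cons.mpr (Or.inr h1))

theorem pv_splitOn_no_sep (c : Char) (m : List Char) (h : c ∉ m) : List.splitOn c m = [m] := by
  have := List.splitOn_intercalate [m] c (by simpa using h) (by simp)
  simpa [List.intercalate] using this

theorem pv_splitOn_sep_append (c : Char) (m rest : List Char) (h : c ∉ m) :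
    List.splitOn c (m ++ c :: rest) = m :: List.splitOn c rest := by
  have hall : ∀ l ∈ m :: List.splitOn c rest, c ∉ l := by
    intro l hl
    rcases List.mem_cons.mp hl with h1 | h1
    · subst h1; exact h
    · exact pv_mem_splitOn_not_mem c rest l h1
  have hr := List.splitOn_intercalate (m :: List.splitOn c rest) c hall (by simp)
  have hic : [c].intercalate (m :: List.splitOn c rest) = m ++ c :: rest := by
    cases hs : List.splitOn c rest with
    | nil => exact absurd hs (List.splitOnP_ne_nil _ _)
    | cons q qs =>
      have : [c].intercalate (q :: qs) = rest := by rw [← hs]; exact List.intercalate_splitOn rest c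
      simpa [List.intercalate] using this
  rwa [hic] at hr

-- PySem's fueled splitter on a one-char separator is Mathlib's List.splitOn
theorem pv_go_spec (c : Char) : ∀ (fuel : Nat) (l cur : List Char) (acc : List (List Char)),
    l.length ≤ fuel → c ∉ cur →
    PySem.Chars.splitOn.go [c] fuel l cur acc = acc.reverse ++ List.splitOn c (cur.reverse ++ l) := by
  intro fuel
  induction fuel with
  | zero =>
    intro l cur acc hl hc
    have : l = [] := List.eq_nil_of_length_eq_zero (Nat.le_zero.mp hl)
    subst this
    simp [PySem.Chars.splitOn.go, pv_splitOn_no_sep c cur.reverse (by simpa using hc)]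
  | succ n ih =>
    intro l cur acc hl hc
    cases l with
    | nil => simp [PySem.Chars.splitOn.go, pv_splitOn_no_sep c cur.reverse (by simpa using hc)]
    | cons a rest =>
      by_cases h : a = c
      · subst h
        have : PySem.Chars.splitOn.go [a] (n+1) (a :: rest) cur acc
            = PySem.Chars.splitOn.go [a] n rest [] (cur.reverse :: acc) := by
          simp [PySem.Chars.splitOn.go, List.isPrefixOf]
        rw [this, ih rest [] (cur.reverse :: acc) (by simpa using hl) (by simp)]
        simp [pv_splitOn_sep_append a cur.reverse rest (by simpa using hc)]
      · have : PySem.Chars.splitOn.go [c] (n+1) (a :: rest) cur acc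
            = PySem.Chars.splitOn.go [c] n rest (a :: cur) acc := by
          simp [PySem.Chars.splitOn.go, List.isPrefixOf, Ne.symm h]
        rw [this, ih rest (a :: cur) acc (by simpa using hl)
              (by simp [hc]; exact fun hca => h hca.symm)]
        simp

theorem pv_charsSplitOn_eq (c : Char) (s : List Char) :
    PySem.Chars.splitOn s [c] = List.splitOn c s := by
  have := pv_go_spec c (s.length + 1) s [] [] (by omega) (by simp)
  simpa [PySem.Chars.splitOn] using this

-- Str.split? on "\n" computes List.splitOn '\n' on the character list
theorem pv_split_newline (s : String) :
    (PySem.Str.split? s "\n").getD [] = (List.splitOn '\n' s.toList).map String.ofList := by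
  have h1 : PySem.Chars.split? s.toList ['\n'] = some (List.splitOn '\n' s.toList) := by
    simp [PySem.Chars.split?, pv_charsSplitOn_eq]
  have h2 : ("\n" : String).toList = ['\n'] := rfl
  simp [PySem.Str.split?, h2, h1]

-- B's loop is A's loop with the quoted-line filter fused in
theorem pv_bLoop_eq_filter (ls : List String) :
    pvBLoop ls = (pvALoop ls).filter (fun l => !(PySem.Str.startswith (PySem.Str.strip l) ">")) := by
  induction ls with
  | nil => rfl
  | cons l rest ih =>
    by_cases h : pvSigBreak l <;>
      by_cases hq : PySem.Str.startswith (PySem.Str.strip l) ">" <;>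
        simp only [pvBLoop, pvALoop, h, hq, List.filter_cons, List.filter_nil, Bool.not_true,
          Bool.not_false, if_true, if_false, Bool.false_eq_true, ih]

theorem pv_aLoop_subset (ls : List String) : ∀ l ∈ pvALoop ls, l ∈ ls := by
  induction ls with
  | nil => intro l hl; simp [pvALoop] at hl
  | cons x rest ih =>
    intro l hl
    by_cases h : pvSigBreak x
    · simp [pvALoop, h] at hl
    · simp only [pvALoop, h, Bool.false_eq_true, ite_false] at hl
      rcases List.mem_cons.mp hl with h1 | h1
      · exact List.mem_cons.mpr (Or.inl h1)
      · exact List.mem_cons.mpr (Or.inr (ih l h1))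

theorem pv_mem_intercalate_infix (sep : List Char) :
    ∀ (ls : List (List Char)) (p : List Char), p ∈ ls → p <:+: sep.intercalate ls := by
  intro ls
  induction ls with
  | nil => intro p hp; simp at hp
  | cons q rest ih =>
    intro p hp
    cases rest with
    | nil =>
      simp at hp
      simp [List.intercalate, hp]
    | cons r rs =>
      have hq : sep.intercalate (q :: r :: rs) = q ++ sep ++ sep.intercalate (r :: rs) := by
        simp [List.intercalate]
      rcases List.mem_cons.mp hp with h1 | h1
      · subst h1
        rw [hq]
        exact ((List.prefix_append p sep).trans
          (List.prefix_append (p ++ sep) (sep.intercalate (r :: rs)))).isInfix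
      · have := ih p h1
        rw [hq]
        exact this.trans (List.suffix_append _ _).isInfix

-- strip keeps a contiguous piece of the line
theorem pv_strip_infix (s : List Char) : PySem.Chars.strip s <:+: s := by
  have h1 : PySem.Chars.lstrip s <:+ s := by
    simp [PySem.Chars.lstrip]; exact List.dropWhile_suffix _
  have h2 : PySem.Chars.rstrip (PySem.Chars.lstrip s) <+: PySem.Chars.lstrip s := by
    simp only [PySem.Chars.rstrip]
    rw [← List.reverse_suffix]
    simpa using List.dropWhile_suffix (l := (PySem.Chars.lstrip s).reverse) (p := PySem.Chars.isspace)
  exact (h2.isInfix).trans h1.isInfix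
  
-- a line whose strip starts with '>' contains '>'
theorem pv_quoted_has_gt (l : String) (h : PySem.Str.startswith (PySem.Str.strip l) ">" = true) :
    ('>' : Char) ∈ l.toList := by
  have hb : PySem.Chars.startswith (PySem.Chars.strip l.toList) ['>'] = true := by
    have := h
    simp only [PySem.Str.startswith_eq] at this
    simpa [PySem.Str.toList_strip] using this
  have hpre : ['>'] <+: PySem.Chars.strip l.toList := by
    simpa [PySem.Chars.startswith, ← List.isPrefixOf_iff_prefix] using hb
  have : ('>' : Char) ∈ PySem.Chars.strip l.toList := hpre.mem (by simp)
  exact (pv_strip_infix l.toList).mem this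

-- the central fact: on every input the two pipelines join the same list of lines
theorem pv_main (body : String) :
    clean_email_content_py body = clean_email_content_py_alt body := by
  have hA : clean_email_content_py body = PySem.Str.strip
      (if PySem.Str.isIn ">" (PySem.Str.join "\n" (pvALoop ((PySem.Str.split? body "\n").getD []))) = true
       then PySem.Str.join "\n"
         (((PySem.Str.split? (PySem.Str.join "\n" (pvALoop ((PySem.Str.split? body "\n").getD []))) "\n").getD []).filter
           (fun line => !(PySem.Str.startswith (PySem.Str.strip line) ">")))
       else PySem.Str.join "\n" (pvALoop ((PySem.Str.split? body "\n").getD []))) := rfl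
  have hB : clean_email_content_py_alt body =
      PySem.Str.strip (PySem.Str.join "\n" (pvBLoop ((PySem.Str.split? body "\n").getD []))) := rfl
  rw [hA, hB, pv_split_newline body, pv_bLoop_eq_filter]
  set lines := (List.splitOn '\n' body.toList).map String.ofList with hlines
  set parts := pvALoop lines with hparts
  set pred := fun l => !(PySem.Str.startswith (PySem.Str.strip l) ">") with hpred
  have hfree : ∀ l ∈ parts, ('\n' : Char) ∉ l.toList := by
    intro l hl
    have hl2 := pv_aLoop_subset lines l hl
    rw [hlines] at hl2
    obtain ⟨p, hp, hpe⟩ := List.mem_map.mp hl2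
    rw [← hpe]
    simpa using pv_mem_splitOn_not_mem '\n' body.toList p hp
  have hcb : (PySem.Str.join "\n" parts).toList = ['\n'].intercalate (parts.map String.toList) := by
    rw [PySem.Str.toList_join]
    rfl
  by_cases hin : PySem.Str.isIn ">" (PySem.Str.join "\n" parts) = true
  · -- guard taken: A re-splits, filters, re-joins; the re-split restores `parts`
    rw [if_pos hin]
    have hne : parts ≠ [] := by
      intro h0
      rw [h0] at hin
      have h1 := (PySem.Str.isIn_iff_infix _ _).mp hin
      have h2 : (PySem.Str.join "\n" ([] : List String)).toList = [] := by
        rw [PySem.Str.toList_join]; simp [PySem.Chars.join_nil]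
      rw [h2, List.infix_nil] at h1
      exact absurd h1 (by simp)
    have hsplit : (PySem.Str.split? (PySem.Str.join "\n" parts) "\n").getD [] = parts := by
      rw [pv_split_newline]
      rw [hcb]
      rw [List.splitOn_intercalate (parts.map String.toList) '\n'
            (by intro l hl; rcases List.mem_map.mp hl with ⟨q, hq, rfl⟩; exact hfree q hq)
            (by simpa using hne)]
      rw [List.map_map]
      have : (String.ofList ∘ String.toList) = id := by
        funext s; simp
      rw [this, List.map_id]
    rw [hsplit]
  · -- guard not taken: no line of `parts` contains '>', so B's filter keeps everything
    rw [if_neg hin]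
    have hkeep : parts.filter pred = parts := by
      apply List.filter_eq_self.mpr
      intro l hl
      rw [hpred]
      simp only [Bool.not_eq_eq_eq_not, Bool.not_true]
      by_contra hq
      have hq2 : PySem.Str.startswith (PySem.Str.strip l) ">" = true := by
        revert hq; cases PySem.Str.startswith (PySem.Str.strip l) ">" <;> simp
      have hgt := pv_quoted_has_gt l hq2
      have hinf : l.toList <:+: (PySem.Str.join "\n" parts).toList := by
        rw [hcb]
        exact pv_mem_intercalate_infix ['\n'] (parts.map String.toList) l.toList
          (List.mem_map.mpr ⟨l, hl, rfl⟩)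
      have : PySem.Str.isIn ">" (PySem.Str.join "\n" parts) = true := by
        rw [PySem.Str.isIn_iff_infix _ _]
        have h1 : (">").toList <:+: l.toList := by
          obtain ⟨s1, s2, he⟩ := List.mem_iff_append.mp hgt
          rw [he]
          exact ⟨s1, s2, by simp⟩
        exact h1.trans hinf
      exact hin this
    rw [hkeep]

-- ===== VERDICT (by name: the statement is the Claim_ definition above) =====
theorem clean_email_content_py_spec : Claim_equal_clean_email_content_py := by
  intro body _
  unfold Spec_clean_email_content_py
  exact pv_main body
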